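-- pv_equiv track=rewrite | github.com/JohnKazantzis/ghc | something.py | simpleApproach
-- ===== SOURCE A (Python) =====
-- def simpleApproach(pizzas, numOf2, numOf3, numOf4):
--     # ------------- Simple Approach -------------
--     outputList = []
--     remPizzas = []
--     for i in range(0, len(pizzas)):
--         remPizzas.append(i)
--
--     pizzaCounter = 0
--     for i in range(int(numOf2)):
--         if len(remPizzas) >= 2:
--             outputList.append([2, remPizzas.pop(0), remPizzas.pop(0)])
--             pizzaCounter += 1
--
--     for i in range(int(numOf3)):
--         if len(remPizzas) >= 3:
--             outputList.append([3, remPizzas.pop(0), remPizzas.pop(0), remPizzas.pop(0)])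
--             pizzaCounter += 1
--
--     for i in range(int(numOf4)):
--         if len(remPizzas) >= 4:
--             outputList.append([4, remPizzas.pop(0), remPizzas.pop(0), remPizzas.pop(0), remPizzas.pop(0)])
--             pizzaCounter += 1
--
--     return outputList, pizzaCounter
-- ===== SOURCE B (Python) =====
-- def simpleApproach(pizzas, numOf2, numOf3, numOf4):
--     # Cursor-based: no remPizzas list, team counts computed arithmetically.
--     outputList = []
--     pizzaCounter = 0
--     pos = 0
--     n = len(pizzas)
--     for size, count in ((2, int(numOf2)), (3, int(numOf3)), (4, int(numOf4))):
--         teams = max(0, min(count, (n - pos) // size))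
--         for _ in range(teams):
--             outputList.append([size] + list(range(pos, pos + size)))
--             pos += size
--             pizzaCounter += 1
--     return outputList, pizzaCounter
-- ===== Notes on version B (the rewrite author's own statement) =====
-- stated objective: faster
-- what changed: Replaces A's materialised remaining-indices list with repeated pop(0) and a per-iteration length guard by a single integer cursor plus an arithmetically precomputed team count (clamped min/floor-division) per size, so surplus requested teams are skipped without iterating.
import Mathlib
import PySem

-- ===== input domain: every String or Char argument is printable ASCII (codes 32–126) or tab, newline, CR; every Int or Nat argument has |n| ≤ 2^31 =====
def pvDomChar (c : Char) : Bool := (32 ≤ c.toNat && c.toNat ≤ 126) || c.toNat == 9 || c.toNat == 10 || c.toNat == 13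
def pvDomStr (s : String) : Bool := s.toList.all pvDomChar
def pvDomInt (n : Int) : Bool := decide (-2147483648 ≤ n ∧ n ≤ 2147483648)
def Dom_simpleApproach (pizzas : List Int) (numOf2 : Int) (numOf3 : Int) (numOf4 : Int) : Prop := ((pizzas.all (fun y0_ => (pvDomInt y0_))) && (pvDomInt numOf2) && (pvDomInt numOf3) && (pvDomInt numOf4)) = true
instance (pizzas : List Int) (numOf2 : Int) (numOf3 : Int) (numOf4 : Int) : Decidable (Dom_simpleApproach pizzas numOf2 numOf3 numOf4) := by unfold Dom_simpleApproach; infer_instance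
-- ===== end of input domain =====

-- B replaces A's remaining-indices list and per-iteration length guard by an integer
-- cursor and an arithmetically computed team count per size (objective: faster).


-- ===== PORT A =====
-- one of A's three 'for i in range(int(numOfK))' loops: guard on remaining length, pop(0) size times
def loopA (size : Nat) (cnt : Nat) (st : List (List Int) × List Int × Int) :
    List (List Int) × List Int × Int :=
  match cnt, st with
  | 0, st => st
  | c + 1, (out, rem, pc) =>
    if size ≤ rem.length then
      loopA size c (out ++ [(size : Int) :: rem.take size], rem.drop size, pc + 1)
    else
      loopA size c (out, rem, pc)

def simpleApproach (pizzas : List Int) (numOf2 : Int) (numOf3 : Int) (numOf4 : Int) :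
    List (List Int) × Int :=
  -- remPizzas = [i for i in range(0, len(pizzas))]
  let rem := PySem.List.pyRange 0 (pizzas.length) 1
  let s1 := loopA 2 numOf2.toNat ([], rem, 0)
  let s2 := loopA 3 numOf3.toNat s1
  let s3 := loopA 4 numOf4.toNat s2
  (s3.1, s3.2.2)

-- ===== PORT B =====
-- B's inner 'for _ in range(teams)' loop: emit [size]+list(range(pos,pos+size)), advance cursor
def loopB (size : Int) (teams : Nat) (st : List (List Int) × Int × Int) :
    List (List Int) × Int × Int :=
  match teams, st with
  | 0, st => st
  | t + 1, (out, pos, pc) =>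
    loopB size t (out ++ [size :: PySem.List.pyRange pos (pos + size) 1], pos + size, pc + 1)

def simpleApproach_alt (pizzas : List Int) (numOf2 : Int) (numOf3 : Int) (numOf4 : Int) :
    List (List Int) × Int :=
  let n : Int := pizzas.length
  let st := [((2 : Int), numOf2), (3, numOf3), (4, numOf4)].foldl
    (fun (st : List (List Int) × Int × Int) (p : Int × Int) =>
      loopB p.1 ((max 0 (min p.2 (PySem.Int.floordiv (n - st.2.1) p.1))).toNat) st)
    ([], 0, 0)
  (st.1, st.2.2)

-- ===== PRECONDITION & SPEC =====
def Spec_simpleApproach (pizzas : List Int) (numOf2 : Int) (numOf3 : Int) (numOf4 : Int) (out : List (List Int) × Int) : Prop := out = simpleApproach_alt pizzas numOf2 numOf3 numOf4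
instance (pizzas : List Int) (numOf2 : Int) (numOf3 : Int) (numOf4 : Int) (out : List (List Int) × Int) : Decidable (Spec_simpleApproach pizzas numOf2 numOf3 numOf4 out) := by unfold Spec_simpleApproach; infer_instance

-- ===== CLAIM (what is proved, stated in full; the proofs are below) =====
def Claim_equal_simpleApproach : Prop := ∀ (pizzas : List Int) (numOf2 : Int) (numOf3 : Int) (numOf4 : Int), Dom_simpleApproach pizzas numOf2 numOf3 numOf4 → Spec_simpleApproach pizzas numOf2 numOf3 numOf4 (simpleApproach pizzas numOf2 numOf3 numOf4)

-- ===== LEMMAS AND PROOFS =====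

-- the list of blocks both loops produce, starting at cursor pos
def blocks (size pos : Int) (t : Nat) : List (List Int) :=
  match t with
  | 0 => []
  | t + 1 => (size :: PySem.List.pyRange pos (pos + size) 1) :: blocks size (pos + size) t

lemma loopB_eq (size : Int) (t : Nat) :
    ∀ (pos : Int) (out : List (List Int)) (pc : Int),
      loopB size t (out, pos, pc) = (out ++ blocks size pos t, pos + size * t, pc + t) := by
  induction t with
  | zero => intro pos out pc; simp [loopB, blocks]
  | succ t ih =>
    intro pos out pc
    simp only [loopB, blocks, ih, Prod.mk.injEq]
    refine ⟨by simp, by push_cast; ring, by push_cast; ring⟩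

lemma loopA_eq (size : Nat) (hs : 0 < size) (n : Int) (cnt : Nat) :
    ∀ (pos : Int), 0 ≤ pos → pos ≤ n → ∀ (out : List (List Int)) (pc : Int),
      loopA size cnt (out, PySem.List.pyRange pos n 1, pc) =
        (out ++ blocks (size : Int) pos (min cnt ((n - pos).toNat / size)),
         PySem.List.pyRange (pos + size * (min cnt ((n - pos).toNat / size))) n 1,
         pc + ((min cnt ((n - pos).toNat / size) : Nat) : Int)) := by
  induction cnt with
  | zero =>
    intro pos _ _ out pc
    simp [loopA, blocks]
  | succ c ih =>
    intro pos hpos hposn out pc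
    have hlen : (PySem.List.pyRange pos n 1).length = (n - pos).toNat :=
      PySem.List.length_pyRange_one pos n
    by_cases hguard : size ≤ (n - pos).toNat
    · -- a full team fits
      have hsplit : PySem.List.pyRange pos n 1 =
          PySem.List.pyRange pos (pos + size) 1 ++ PySem.List.pyRange (pos + size) n 1 :=
        PySem.List.pyRange_one_append pos (pos + size) n (by omega) (by omega)
      have hlen1 : (PySem.List.pyRange pos (pos + size) 1).length = size := by
        rw [PySem.List.length_pyRange_one]; omega
      have htake : (PySem.List.pyRange pos n 1).take size =
          PySem.List.pyRange pos (pos + size) 1 := by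
        rw [hsplit, List.take_left' hlen1]
      have hdrop : (PySem.List.pyRange pos n 1).drop size =
          PySem.List.pyRange (pos + size) n 1 := by
        rw [hsplit, List.drop_left' hlen1]
      have hdiv : (n - pos).toNat / size = ((n - pos).toNat - size) / size + 1 :=
        Nat.div_eq_sub_div hs hguard
      have hsub : (n - pos).toNat - size = (n - (pos + size)).toNat := by omega
      have hq1 : (n - pos).toNat / size = (n - (pos + size)).toNat / size + 1 := by
        rw [hdiv, hsub]
      have hmin : min (c + 1) ((n - pos).toNat / size)
          = min c ((n - (pos + size)).toNat / size) + 1 := by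
        generalize hX : (n - (pos + (size:Int))).toNat / size = X at hq1 ⊢
        rw [hq1]; omega
      simp only [loopA, hlen, if_pos hguard, htake, hdrop]
      rw [ih (pos + size) (by omega) (by omega)]
      rw [hmin]
      refine Prod.ext ?_ (Prod.ext ?_ ?_)
      · simp [blocks]
      · show PySem.List.pyRange _ n 1 = PySem.List.pyRange _ n 1
        congr 1; push_cast; ring
      · show _ = _; push_cast; ring
    · -- no team fits: iteration is a no-op, and the quotient is 0
      have hq : (n - pos).toNat / size = 0 := Nat.div_eq_of_lt (by omega)
      simp only [loopA, hlen, if_neg hguard]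
      rw [ih pos hpos hposn, hq]
      simp [blocks]

-- B's arithmetically computed team count equals the count A's guarded loop reaches
lemma teams_eq (cnt : Int) (size : Nat) (hs : 0 < size) (n pos : Int)
    (_hpos : 0 ≤ pos) (hposn : pos ≤ n) :
    (max 0 (min cnt (PySem.Int.floordiv (n - pos) (size : Int)))).toNat
      = min cnt.toNat ((n - pos).toNat / size) := by
  have h1 : PySem.Int.floordiv (n - pos) (size : Int) = (n - pos) / (size : Int) :=
    PySem.Int.floordiv_eq_ediv_of_pos (by exact_mod_cast hs)
  have h2 : (n - pos) = (((n - pos).toNat : Nat) : Int) := by omega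
  have h3 : (n - pos) / (size : Int) = (((n - pos).toNat / size : Nat) : Int) := by
    rw [h2]; exact_mod_cast (Int.natCast_div (n - pos).toNat size).symm
  rw [h1, h3]
  generalize (n - pos).toNat / size = q
  omega

lemma cursor_le (size : Nat) (_hs : 0 < size) (n pos : Int) (c : Nat)
    (hposn : pos ≤ n) :
    pos + (size : Int) * (min c ((n - pos).toNat / size) : Nat) ≤ n := by
  have h1 : size * (min c ((n - pos).toNat / size)) ≤ size * ((n - pos).toNat / size) :=
    Nat.mul_le_mul_left size (Nat.min_le_right _ _)
  have h2 : size * ((n - pos).toNat / size) ≤ (n - pos).toNat := by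
    rw [Nat.mul_comm]; exact Nat.div_mul_le_self _ _
  have := Nat.le_trans h1 h2
  omega

-- relate A's loop state (output, remaining indices, counter) to B's (output, cursor, counter)
def StRel (n : Int) (sA : List (List Int) × List Int × Int)
    (sB : List (List Int) × Int × Int) : Prop :=
  sA.1 = sB.1 ∧ sA.2.2 = sB.2.2 ∧ sA.2.1 = PySem.List.pyRange sB.2.1 n 1 ∧
    0 ≤ sB.2.1 ∧ sB.2.1 ≤ n

lemma stage (size : Nat) (hs : 0 < size) (n : Int) (cnt : Int)
    (sA : List (List Int) × List Int × Int) (sB : List (List Int) × Int × Int)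
    (h : StRel n sA sB) :
    StRel n (loopA size cnt.toNat sA)
      (loopB (size : Int)
        ((max 0 (min cnt (PySem.Int.floordiv (n - sB.2.1) (size : Int)))).toNat) sB) := by
  obtain ⟨a1, a2, pc⟩ := sA
  obtain ⟨b1, pos, bpc⟩ := sB
  obtain ⟨h1, h2, h3, h4, h5⟩ := h
  simp only at h1 h2 h3 h4 h5
  subst h1 h2 h3
  rw [teams_eq cnt size hs n pos h4 h5]
  rw [loopA_eq size hs n cnt.toNat pos h4 h5]
  rw [loopB_eq]
  have hc := cursor_le size hs n pos cnt.toNat h5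
  have hp : (0:Int) ≤ (min cnt.toNat ((n - pos).toNat / size) : Nat) := by positivity
  refine ⟨rfl, rfl, rfl, ?_, ?_⟩
  · show (0:Int) ≤ pos + (size : Int) * ((min cnt.toNat ((n - pos).toNat / size) : Nat) : Int)
    have hd : (0:Int) ≤ (size : Int) * ((min cnt.toNat ((n - pos).toNat / size) : Nat) : Int) :=
      by positivity
    omega
  · exact hc

-- ===== VERDICT (by name: the statement is the Claim_ definition above) =====
theorem simpleApproach_spec : Claim_equal_simpleApproach := by
  intro pizzas numOf2 numOf3 numOf4 _
  unfold Spec_simpleApproach simpleApproach simpleApproach_alt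
  simp only [List.foldl]
  set n : Int := (pizzas.length : Int) with hn
  have h0 : StRel n ([], PySem.List.pyRange 0 n 1, 0) ([], 0, 0) :=
    ⟨rfl, rfl, rfl, le_rfl, by positivity⟩
  have h1 := stage 2 (by omega) n numOf2 _ _ h0
  have h2 := stage 3 (by omega) n numOf3 _ _ h1
  have h3 := stage 4 (by omega) n numOf4 _ _ h2
  simp only [Nat.cast_ofNat] at h3
  obtain ⟨e1, e2, -⟩ := h3
  exact Prod.ext e1 e2
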